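-- pv_equiv track=rewrite | github.com/brbisheng/coop3 | single_model_perspective_extractor/src/perspective_extractor/normalize.py | _strip_filler
-- ===== SOURCE A (Python) =====
-- _FILLER_PREFIXES = (
--     "i want to know",
--     "i'd like to know",
--     "i would like to know",
--     "i am trying to understand",
--     "i'm trying to understand",
--     "i am curious about",
--     "i'm curious about",
--     "can you tell me",
--     "could you tell me",
--     "can you explain",
--     "could you explain",
--     "please explain",
--     "please tell me",
-- )
--
-- def _strip_filler(text: str) -> str:
--     cleaned = text.strip().strip('"\'“”')
--     lowered = cleaned.lower()
--     for prefix in _FILLER_PREFIXES: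
--         if lowered.startswith(prefix):
--             cleaned = cleaned[len(prefix):].lstrip(" ,:-")
--             break
--     return cleaned
-- ===== SOURCE B (Python) =====
-- _FILLER_PREFIXES = (
--     "i want to know",
--     "i'd like to know",
--     "i would like to know",
--     "i am trying to understand",
--     "i'm trying to understand",
--     "i am curious about",
--     "i'm curious about",
--     "can you tell me",
--     "could you tell me",
--     "can you explain",
--     "could you explain",
--     "please explain",
--     "please tell me",
-- )
--
-- # One trie over all filler prefixes, built once; matching is a single
-- # character-by-character walk instead of a startswith scan per prefix.
-- _TRIE = {}
-- for _p in _FILLER_PREFIXES: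
--     _node = _TRIE
--     for _ch in _p:
--         _node = _node.setdefault(_ch, {})
--     _node[None] = True
--
--
-- def _strip_filler(text: str) -> str:
--     cleaned = text.strip().strip('"\'“”')
--     node = _TRIE
--     k = 0
--     for ch in cleaned:
--         if None in node:
--             break
--         node = node.get(ch.lower())
--         if node is None:
--             return cleaned
--         k += 1
--     if None in node:
--         return cleaned[k:].lstrip(" ,:-")
--     return cleaned
-- ===== Notes on version B (the rewrite author's own statement) =====
-- stated objective: alternative
-- what changed: Replaces A's linear startswith scan over the 13 filler prefixes with a single character-by-character walk through a trie built once from the prefixes (prefix-free, so the first trie accept equals A's first list match).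
import Mathlib
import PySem

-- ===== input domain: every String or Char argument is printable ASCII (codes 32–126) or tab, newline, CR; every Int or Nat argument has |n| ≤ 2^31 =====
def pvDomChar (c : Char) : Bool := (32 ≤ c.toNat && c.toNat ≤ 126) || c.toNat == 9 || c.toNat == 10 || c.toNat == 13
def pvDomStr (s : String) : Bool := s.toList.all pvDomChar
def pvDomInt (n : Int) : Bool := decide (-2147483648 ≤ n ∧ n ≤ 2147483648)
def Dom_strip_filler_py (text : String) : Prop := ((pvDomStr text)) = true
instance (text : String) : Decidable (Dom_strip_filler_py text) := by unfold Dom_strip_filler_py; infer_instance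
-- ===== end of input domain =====

-- B replaces A's startswith scan over the 13 filler prefixes by one walk through a
-- trie built once from the prefixes (objective: alternative / idiomatic single pass).

-- module constant _FILLER_PREFIXES (shared by both Pythons)
def pvFillerPrefixes : List String :=
  [ "i want to know", "i'd like to know", "i would like to know",
    "i am trying to understand", "i'm trying to understand",
    "i am curious about", "i'm curious about",
    "can you tell me", "could you tell me",
    "can you explain", "could you explain",
    "please explain", "please tell me" ]

-- hand port of s.lstrip(" ,:-"): drop leading chars of the set (exact: lstrip with a
-- char argument removes exactly the leading characters that are in the set)
def pvLstripPunct (s : List Char) : List Char :=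
  s.dropWhile (fun c => c = ' ' ∨ c = ',' ∨ c = ':' ∨ c = '-')

-- ===== PORT A =====
-- A's for-loop over the prefixes with break: first prefix that lowered starts with
-- yields cleaned[len(prefix):].lstrip(" ,:-"), otherwise cleaned unchanged
def pvLoopA (lowered cleaned : String) : List String → String
  | [] => cleaned
  | p :: rest =>
    if PySem.Str.startswith lowered p then
      String.ofList (pvLstripPunct ((PySem.Str.slice cleaned (some (PySem.Str.len p)) none).toList))
    else pvLoopA lowered cleaned rest

def strip_filler_py (text : String) : String :=
  let cleaned := PySem.Str.stripChars (PySem.Str.strip text) "\"'“”"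
  let lowered := PySem.Str.lower cleaned
  pvLoopA lowered cleaned pvFillerPrefixes

-- ===== PORT B =====
-- Source B's dict-of-dicts trie (the None key marking an accepting node becomes the Bool)
mutual
inductive PvTrie where
  | node : Bool → PvEdges → PvTrie
inductive PvEdges where
  | nil : PvEdges
  | cons : Char → PvTrie → PvEdges → PvEdges
end

def pvEdgesFind (c : Char) : PvEdges → Option PvTrie
  | .nil => none
  | .cons c' t es => if c' = c then some t else pvEdgesFind c es

def pvEdgesSet (c : Char) (t : PvTrie) : PvEdges → PvEdges
  | .nil => .cons c t .nil
  | .cons c' t' es => if c' = c then .cons c' t es else .cons c' t' (pvEdgesSet c t es)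

-- _node.setdefault chain of Source B: insert one prefix into the trie
def pvTrieInsert : PvTrie → List Char → PvTrie
  | .node _ es, [] => .node true es
  | .node b es, c :: cs =>
    let child := (pvEdgesFind c es).getD (.node false .nil)
    .node b (pvEdgesSet c (pvTrieInsert child cs) es)

-- _TRIE, built once from the prefixes
def pvTrie : PvTrie :=
  pvFillerPrefixes.foldl (fun t p => pvTrieInsert t p.toList) (.node false .nil)

-- Source B's loop: walk the trie over the characters (lowercased one at a time),
-- stopping at the first accepting node; returns the matched length, none if no match
def pvWalkB : PvTrie → List Char → Nat → Option Nat
  | .node true _, _, k => some k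
  | .node false _, [], _ => none
  | .node false es, c :: cs, k =>
    match pvEdgesFind (PySem.Chars.lowerChar c) es with
    | none => none
    | some t => pvWalkB t cs (k + 1)

def strip_filler_py_alt (text : String) : String :=
  let cleaned := PySem.Str.stripChars (PySem.Str.strip text) "\"'“”"
  match pvWalkB pvTrie cleaned.toList 0 with
  | some k => String.ofList (pvLstripPunct (cleaned.toList.drop k))  -- cleaned[k:].lstrip(" ,:-"), k ≥ 0
  | none => cleaned

-- ===== PRECONDITION & SPEC =====
def Spec_strip_filler_py (text : String) (out : String) : Prop := out = strip_filler_py_alt text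
instance (text : String) (out : String) : Decidable (Spec_strip_filler_py text out) := by unfold Spec_strip_filler_py; infer_instance

-- ===== CLAIM (what is proved, stated in full; the proofs are below) =====
def Claim_equal_strip_filler_py : Prop := ∀ (text : String), Dom_strip_filler_py text → Spec_strip_filler_py text (strip_filler_py text)

-- ===== LEMMAS AND PROOFS =====

-- proof-side walk without per-character lowering
def pvWalk : PvTrie → List Char → Nat → Option Nat
  | .node true _, _, k => some k
  | .node false _, [], _ => none
  | .node false es, c :: cs, k =>
    match pvEdgesFind c es with
    | none => none
    | some t => pvWalk t cs (k + 1)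

-- minimum of two optional lengths (none = no match)
def pvOmin : Option Nat → Option Nat → Option Nat
  | none, y => y
  | some m, none => some m
  | some m, some n => some (min m n)

-- the minimum matched length over a list of prefixes
def pvMinMatch (L : List String) (cs : List Char) (k : Nat) : Option Nat :=
  L.foldr (fun p acc => pvOmin (if p.toList <+: cs then some (k + p.toList.length) else none) acc) none

theorem pvOmin_none_right (x : Option Nat) : pvOmin x none = x := by
  cases x <;> rfl

theorem pvOmin_assoc (a b c : Option Nat) : pvOmin (pvOmin a b) c = pvOmin a (pvOmin b c) := by
  cases a <;> cases b <;> cases c <;> simp [pvOmin, Nat.min_assoc]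

theorem pvWalkB_eq_pvWalk : ∀ (cs : List Char) (t : PvTrie) (k : Nat),
    pvWalkB t cs k = pvWalk t (cs.map PySem.Chars.lowerChar) k := by
  intro cs
  induction cs with
  | nil => intro t k; rcases t with ⟨b, es⟩; cases b <;> simp [pvWalkB, pvWalk]
  | cons c cs ih =>
    intro t k; rcases t with ⟨b, es⟩
    cases b
    · simp only [pvWalkB, pvWalk, List.map]
      cases pvEdgesFind (PySem.Chars.lowerChar c) es with
      | none => rfl
      | some t' => exact ih t' (k + 1)
    · simp [pvWalkB, pvWalk]

theorem pvWalk_le : ∀ (cs : List Char) (t : PvTrie) (k m : Nat),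
    pvWalk t cs k = some m → k ≤ m := by
  intro cs
  induction cs with
  | nil =>
    intro t k m h; rcases t with ⟨b, es⟩
    cases b <;> simp [pvWalk] at h
    omega
  | cons c cs ih =>
    intro t k m h; rcases t with ⟨b, es⟩
    cases b
    · simp only [pvWalk] at h
      cases hf : pvEdgesFind c es with
      | none => rw [hf] at h; exact absurd h (by simp)
      | some t' => rw [hf] at h; have := ih t' (k + 1) m h; omega
    · simp [pvWalk] at h; omega

theorem pvEdgesFind_set_self (c : Char) (t : PvTrie) :
    (es : PvEdges) → pvEdgesFind c (pvEdgesSet c t es) = some t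
  | .nil => by simp [pvEdgesSet, pvEdgesFind]
  | .cons c' t' es => by
    by_cases h : c' = c
    · simp [pvEdgesSet, pvEdgesFind, h]
    · simp [pvEdgesSet, pvEdgesFind, h, pvEdgesFind_set_self c t es]

theorem pvEdgesFind_set_ne (c c' : Char) (hne : c' ≠ c) (t : PvTrie) :
    (es : PvEdges) → pvEdgesFind c' (pvEdgesSet c t es) = pvEdgesFind c' es
  | .nil => by simp [pvEdgesSet, pvEdgesFind, Ne.symm hne]
  | .cons c'' t' es => by
    by_cases h : c'' = c
    · subst h; simp [pvEdgesSet, pvEdgesFind, Ne.symm hne]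
    · simp [pvEdgesSet, pvEdgesFind, h, pvEdgesFind_set_ne c c' hne t es]

theorem pvWalk_emptyNode (cs : List Char) (k : Nat) :
    pvWalk (.node false .nil) cs k = none := by
  cases cs <;> simp [pvWalk, pvEdgesFind]

theorem pvWalk_insert : ∀ (p : List Char) (t : PvTrie) (cs : List Char) (k : Nat),
    pvWalk (pvTrieInsert t p) cs k
      = pvOmin (pvWalk t cs k) (if p <+: cs then some (k + p.length) else none) := by
  intro p
  induction p with
  | nil =>
    intro t cs k; rcases t with ⟨b, es⟩
    cases b
    · simp only [pvTrieInsert, pvWalk, List.nil_prefix, if_pos, List.length_nil, Nat.add_zero]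
      cases hw : pvWalk (.node false es) cs k with
      | none => rfl
      | some m =>
        have := pvWalk_le cs _ k m hw
        simp [pvOmin, Nat.min_eq_right this]
    · simp [pvTrieInsert, pvWalk, pvOmin]
  | cons c ps ih =>
    intro t cs k; rcases t with ⟨b, es⟩
    cases b
    · cases cs with
      | nil =>
        have : ¬ ((c :: ps) <+: ([] : List Char)) := by simp
        simp [pvTrieInsert, pvWalk, this, pvOmin]
      | cons c' cs' =>
        by_cases hc : c' = c
        · subst hc
          simp only [pvTrieInsert, pvWalk, pvEdgesFind_set_self]
          rw [ih]
          have harith : k + 1 + ps.length = k + (ps.length + 1) := by omega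
          cases hf : pvEdgesFind c' es with
          | none =>
            by_cases hp : ps <+: cs'
            · simp [pvWalk_emptyNode, hp, List.cons_prefix_cons, pvOmin, harith]
            · simp [pvWalk_emptyNode, hp, List.cons_prefix_cons, pvOmin]
          | some tc =>
            by_cases hp : ps <+: cs' <;>
              simp [hp, List.cons_prefix_cons, harith]
        · have hcs : ¬ ((c :: ps) <+: (c' :: cs')) := by
            intro h; exact hc (by simpa using (List.cons_prefix_cons.mp h).1.symm)
          simp only [pvTrieInsert, pvWalk, hcs, if_neg, not_false_iff,
            pvEdgesFind_set_ne c c' hc]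
          rw [pvOmin_none_right]
    · -- accepting node: walk stops immediately on both sides
      simp only [pvTrieInsert, pvWalk]
      by_cases hp : (c :: ps) <+: cs
      · simp [hp, pvOmin]
      · simp [hp, pvOmin]

theorem pvWalk_foldl : ∀ (L : List String) (t : PvTrie) (cs : List Char) (k : Nat),
    pvWalk (L.foldl (fun t p => pvTrieInsert t p.toList) t) cs k
      = pvOmin (pvWalk t cs k) (pvMinMatch L cs k) := by
  intro L
  induction L with
  | nil => intro t cs k; simp [pvMinMatch, pvOmin_none_right]
  | cons p L ih =>
    intro t cs k
    simp only [List.foldl_cons]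
    rw [ih, pvWalk_insert]
    simp only [pvMinMatch, List.foldr_cons]
    rw [pvOmin_assoc]

theorem pvMinMatch_none (L : List String) (cs : List Char) (k : Nat)
    (h : ∀ q ∈ L, ¬ (q.toList <+: cs)) : pvMinMatch L cs k = none := by
  induction L with
  | nil => rfl
  | cons p L ih =>
    simp only [pvMinMatch, List.foldr_cons]
    have hp : ¬ (p.toList <+: cs) := h p (by simp)
    rw [if_neg hp]
    exact ih (fun q hq => h q (by simp [hq]))

-- A's slice cleaned[len(p):] as a list drop
theorem pvSlice_toList (cleaned p : String) :
    (PySem.Str.slice cleaned (some (PySem.Str.len p)) none).toList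
      = cleaned.toList.drop p.toList.length := by
  have h := PySem.Str.toList_slice cleaned (some (PySem.Str.len p)) none
  rw [h]
  simp [PySem.Chars.slice_eq_listSlice, PySem.Str.len,
    PySem.List.slice_from_natCast]

-- A's first-match loop equals the minimum match, for a pairwise prefix-free list
theorem pvLoopA_eq (L : List String) (lw cleaned : String)
    (hpw : L.Pairwise (fun p q => ¬ (p.toList <+: q.toList) ∧ ¬ (q.toList <+: p.toList))) :
    pvLoopA lw cleaned L
      = match pvMinMatch L lw.toList 0 with
        | some k => String.ofList (pvLstripPunct (cleaned.toList.drop k))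
        | none => cleaned := by
  induction L with
  | nil => rfl
  | cons p L ih =>
    rcases List.pairwise_cons.mp hpw with ⟨hp, hL⟩
    by_cases hs : PySem.Str.startswith lw p = true
    · have hpre : p.toList <+: lw.toList := by
        have := PySem.Str.startswith_eq lw p
        rw [this] at hs
        exact (PySem.Chars.startswith_iff _ _).mp hs
      have hrest : pvMinMatch L lw.toList 0 = none := by
        apply pvMinMatch_none
        intro q hq hqpre
        rcases List.prefix_or_prefix_of_prefix hpre hqpre with h | h
        · exact (hp q hq).1 h
        · exact (hp q hq).2 h
      simp only [pvLoopA, hs, if_pos, pvMinMatch, List.foldr_cons]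
      rw [if_pos hpre]
      have : pvMinMatch L lw.toList 0 = none := hrest
      simp only [pvMinMatch] at this
      rw [this, pvOmin_none_right]
      rw [pvSlice_toList]
      simp
    · have hnpre : ¬ (p.toList <+: lw.toList) := by
        intro h
        apply hs
        rw [PySem.Str.startswith_eq]
        exact (PySem.Chars.startswith_iff _ _).mpr h
      simp only [pvLoopA, hs, if_neg, Bool.not_eq_true]
      rw [ih hL]
      simp only [pvMinMatch, List.foldr_cons]
      rw [if_neg hnpre]
      rfl

set_option maxHeartbeats 1000000 in
theorem pvPrefixesPairwise :
    pvFillerPrefixes.Pairwise (fun p q => ¬ (p.toList <+: q.toList) ∧ ¬ (q.toList <+: p.toList)) := by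
  decide

theorem pvMainAux (text : String) : strip_filler_py text = strip_filler_py_alt text := by
  simp only [strip_filler_py, strip_filler_py_alt]
  generalize PySem.Str.stripChars (PySem.Str.strip text) "\"'“”" = cleaned
  rw [pvLoopA_eq pvFillerPrefixes (PySem.Str.lower cleaned) cleaned pvPrefixesPairwise]
  rw [pvWalkB_eq_pvWalk]
  have hlow : cleaned.toList.map PySem.Chars.lowerChar = (PySem.Str.lower cleaned).toList := by
    rw [PySem.Str.toList_lower]; rfl
  rw [hlow]
  rw [show pvTrie = pvFillerPrefixes.foldl (fun t p => pvTrieInsert t p.toList) (.node false .nil) from rfl]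
  rw [pvWalk_foldl]
  rw [pvWalk_emptyNode]
  rfl

-- ===== VERDICT (by name: the statement is the Claim_ definition above) =====
theorem strip_filler_py_spec : Claim_equal_strip_filler_py := by
  intro text _
  exact pvMainAux text
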